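-- pv_equiv track=rewrite | github.com/dogyunkim-lab/prompt_improver | services/phase2_design.py | _select_cases_for_candidate
-- ===== SOURCE A (Python) =====
-- def _select_cases_for_candidate(
--     focus_patterns: list, improvable_cases: list, max_cases: int = 5
-- ) -> list:
--     """focus_patterns에 매칭되는 케이스 우선 선별, 부족하면 빈도순 보충."""
--     selected = []
--     selected_ids = set()
--
--     # focus_patterns 매칭 우선
--     for case in improvable_cases:
--         if len(selected) >= max_cases:
--             break
--         case_pattern = case.get("error_pattern", "")
--         if case_pattern and any(fp in case_pattern for fp in focus_patterns):
--             if case["case_id"] not in selected_ids: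
--                 selected.append(case)
--                 selected_ids.add(case["case_id"])
--
--     # 부족하면 빈도순(리스트 순서) 보충
--     for case in improvable_cases:
--         if len(selected) >= max_cases:
--             break
--         if case["case_id"] not in selected_ids:
--             selected.append(case)
--             selected_ids.add(case["case_id"])
--
--     return selected
-- ===== SOURCE B (Python) =====
-- def _select_cases_for_candidate(
--     focus_patterns: list, improvable_cases: list, max_cases: int = 5
-- ) -> list:
--     """Sort-based rewrite: stable-sort cases by a match flag, then one capped dedup scan."""
--     def matched(case):
--         pattern = case.get("error_pattern", "")
--         return bool(pattern) and any(fp in pattern for fp in focus_patterns)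
--
--     ranked = sorted(improvable_cases, key=lambda c: 0 if matched(c) else 1)
--
--     selected = []
--     seen = set()
--     for case in ranked:
--         if len(selected) >= max_cases:
--             break
--         cid = case["case_id"]
--         if cid not in seen:
--             selected.append(case)
--             seen.add(cid)
--     return selected
-- ===== Notes on version B (the rewrite author's own statement) =====
-- stated objective: alternative
-- what changed: Replaces A's two staged capped scans (matched pass, then backfill pass sharing a seen-id set) with a stable sort of all cases by a binary match flag followed by a single capped dedup scan over the sorted list.
import Mathlib
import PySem

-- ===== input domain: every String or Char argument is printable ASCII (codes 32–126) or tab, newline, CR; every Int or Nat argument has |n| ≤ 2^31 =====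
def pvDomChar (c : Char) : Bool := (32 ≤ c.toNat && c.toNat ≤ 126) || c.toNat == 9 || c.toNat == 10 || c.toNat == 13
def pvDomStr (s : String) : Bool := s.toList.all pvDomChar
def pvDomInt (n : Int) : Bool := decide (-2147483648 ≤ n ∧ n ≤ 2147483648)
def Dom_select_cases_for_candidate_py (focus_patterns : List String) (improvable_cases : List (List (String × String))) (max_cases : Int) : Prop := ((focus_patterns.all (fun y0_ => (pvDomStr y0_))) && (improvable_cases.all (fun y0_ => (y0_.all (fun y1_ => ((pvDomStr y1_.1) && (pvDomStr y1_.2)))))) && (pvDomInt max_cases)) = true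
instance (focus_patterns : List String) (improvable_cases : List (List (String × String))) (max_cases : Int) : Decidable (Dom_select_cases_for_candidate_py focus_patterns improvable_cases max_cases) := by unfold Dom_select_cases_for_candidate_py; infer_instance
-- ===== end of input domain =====

-- B replaces A's two staged capped scans with a stable sort by a binary match flag followed by
-- ONE capped dedup scan (objective: alternative decomposition, similar cost).
-- Equality of RETURN values is what is proved, on Pre_ below.

-- ===== PORT A =====
-- case["case_id"]: first-match lookup on the association list; ported as getD "" — total
-- stand-in, Pre_ guarantees the key is present wherever the Python evaluates it.
def pvCaseId (c : List (String × String)) : String := (PySem.Dict.mk c).getD "case_id" ""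

-- A's second loop: backfill in list order, cap and seen-id set
def pvLoopBackfill (max_cases : Int) :
    List (List (String × String)) → List (List (String × String)) → PySem.Set String →
    (List (List (String × String)) × PySem.Set String)
  | [], selected, selected_ids => (selected, selected_ids)
  | c :: rest, selected, selected_ids =>
    if max_cases ≤ (selected.length : Int) then (selected, selected_ids)
    else if PySem.Set.contains selected_ids (pvCaseId c) then
      pvLoopBackfill max_cases rest selected selected_ids
    else
      pvLoopBackfill max_cases rest (selected ++ [c]) (PySem.Set.add selected_ids (pvCaseId c))

-- A's first loop: focus_patterns matches first (the pattern test inline, as in A)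
def pvLoopFocus (focus_patterns : List String) (max_cases : Int) :
    List (List (String × String)) → List (List (String × String)) → PySem.Set String →
    (List (List (String × String)) × PySem.Set String)
  | [], selected, selected_ids => (selected, selected_ids)
  | c :: rest, selected, selected_ids =>
    if max_cases ≤ (selected.length : Int) then (selected, selected_ids)
    else
      let case_pattern := (PySem.Dict.mk c).getD "error_pattern" ""
      if (case_pattern != "") && focus_patterns.any (fun fp => PySem.Str.isIn fp case_pattern) then
        if PySem.Set.contains selected_ids (pvCaseId c) then
          pvLoopFocus focus_patterns max_cases rest selected selected_ids
        else
          pvLoopFocus focus_patterns max_cases rest (selected ++ [c])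
            (PySem.Set.add selected_ids (pvCaseId c))
      else pvLoopFocus focus_patterns max_cases rest selected selected_ids

def select_cases_for_candidate_py (focus_patterns : List String) (improvable_cases : List (List (String × String))) (max_cases : Int) : List (List (String × String)) :=
  let st := pvLoopFocus focus_patterns max_cases improvable_cases [] PySem.Set.empty
  (pvLoopBackfill max_cases improvable_cases st.1 st.2).1

-- ===== PORT B =====
-- matched(case) of Source B
def pvMatches (focus_patterns : List String) (c : List (String × String)) : Bool :=
  let pattern := (PySem.Dict.mk c).getD "error_pattern" ""
  (pattern != "") && focus_patterns.any (fun fp => PySem.Str.isIn fp pattern)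

-- the sort key: 0 if matched(c) else 1
def pvFlag (focus_patterns : List String) (c : List (String × String)) : Int :=
  if pvMatches focus_patterns c then 0 else 1

-- Source B's single capped dedup scan over the ranked list
def pvScan (max_cases : Int) :
    List (List (String × String)) → List (List (String × String)) → PySem.Set String →
    List (List (String × String))
  | [], selected, _ => selected
  | c :: rest, selected, seen =>
    if max_cases ≤ (selected.length : Int) then selected
    else
      let cid := pvCaseId c
      if PySem.Set.contains seen cid then pvScan max_cases rest selected seen
      else pvScan max_cases rest (selected ++ [c]) (PySem.Set.add seen cid)

def select_cases_for_candidate_py_alt (focus_patterns : List String) (improvable_cases : List (List (String × String))) (max_cases : Int) : List (List (String × String)) :=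
  let ranked := PySem.List.sorted improvable_cases (pvFlag focus_patterns)
  pvScan max_cases ranked [] PySem.Set.empty

-- ===== PRECONDITION & SPEC =====
-- Pre_ excludes inputs where some case lacks the "case_id" key while max_cases > 0: there the
-- Python A raises KeyError, except in the corner where the cap is filled before an id-less case
-- is reached (A then still returns; B returns the same value there, but it lies outside the claim).
def Pre_select_cases_for_candidate_py (focus_patterns : List String) (improvable_cases : List (List (String × String))) (max_cases : Int) : Prop :=
  max_cases ≤ 0 ∨ ∀ c ∈ improvable_cases, (PySem.Dict.mk c).contains "case_id" = true
instance (focus_patterns : List String) (improvable_cases : List (List (String × String))) (max_cases : Int) : Decidable (Pre_select_cases_for_candidate_py focus_patterns improvable_cases max_cases) := by unfold Pre_select_cases_for_candidate_py; infer_instance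

def pvWitness_select_cases_for_candidate_py : List String × (List (List (String × String))) × Int :=
  (["err"], [[("error_pattern", "err 1"), ("case_id", "a")], [("case_id", "b")]], 5)

def Spec_select_cases_for_candidate_py (focus_patterns : List String) (improvable_cases : List (List (String × String))) (max_cases : Int) (out : List (List (String × String))) : Prop := out = select_cases_for_candidate_py_alt focus_patterns improvable_cases max_cases
instance (focus_patterns : List String) (improvable_cases : List (List (String × String))) (max_cases : Int) (out : List (List (String × String))) : Decidable (Spec_select_cases_for_candidate_py focus_patterns improvable_cases max_cases out) := by unfold Spec_select_cases_for_candidate_py; infer_instance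

-- ===== CLAIM (what is proved, stated in full; the proofs are below) =====
def Claim_equal_select_cases_for_candidate_py : Prop := ∀ (focus_patterns : List String) (improvable_cases : List (List (String × String))) (max_cases : Int), Dom_select_cases_for_candidate_py focus_patterns improvable_cases max_cases → Pre_select_cases_for_candidate_py focus_patterns improvable_cases max_cases → Spec_select_cases_for_candidate_py focus_patterns improvable_cases max_cases (select_cases_for_candidate_py focus_patterns improvable_cases max_cases)

-- ===== LEMMAS AND PROOFS =====

-- first-occurrence dedup by case_id, skipping ids already seen (proof-side common form)
def pvDedup (ids : List String) : List (List (String × String)) → List (List (String × String))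
  | [] => []
  | c :: rest =>
    if pvCaseId c ∈ ids then pvDedup ids rest
    else c :: pvDedup (ids ++ [pvCaseId c]) rest

theorem pvBackfill_of_cap (mc : Int) (l : List (List (String × String)))
    (sel : List (List (String × String))) (ids : PySem.Set String)
    (h : mc ≤ (sel.length : Int)) : pvLoopBackfill mc l sel ids = (sel, ids) := by
  cases l <;> simp [pvLoopBackfill, h]

theorem pvFocus_eq_backfill_filter (fps : List String) (mc : Int)
    (l sel : List (List (String × String))) (ids : PySem.Set String) :
    pvLoopFocus fps mc l sel ids = pvLoopBackfill mc (l.filter (pvMatches fps)) sel ids := by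
  induction l generalizing sel ids with
  | nil => rfl
  | cons c rest ih =>
    simp only [List.filter_cons]
    by_cases hcap : mc ≤ (sel.length : Int)
    · have hL : pvLoopFocus fps mc (c :: rest) sel ids = (sel, ids) := by
        simp [pvLoopFocus, hcap]
      rw [hL]
      split_ifs <;> rw [pvBackfill_of_cap _ _ _ _ hcap]
    · by_cases hm : pvMatches fps c = true
      · have hm' := hm; simp only [pvMatches] at hm'
        simp only [pvLoopFocus, if_neg hcap, hm', if_true, hm, pvLoopBackfill]
        split_ifs with h
        · exact ih sel ids
        · exact ih (sel ++ [c]) _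
      · have hm' := hm; simp only [pvMatches] at hm'
        simp only [pvLoopFocus, if_neg hcap, if_neg hm', hm, if_false, Bool.false_eq_true]
        exact ih sel ids

theorem pvBackfill_append (mc : Int) (l1 l2 sel : List (List (String × String)))
    (ids : PySem.Set String) :
    pvLoopBackfill mc (l1 ++ l2) sel ids =
      pvLoopBackfill mc l2 (pvLoopBackfill mc l1 sel ids).1 (pvLoopBackfill mc l1 sel ids).2 := by
  induction l1 generalizing sel ids with
  | nil => rfl
  | cons c rest ih =>
    by_cases hcap : mc ≤ (sel.length : Int)
    · rw [pvBackfill_of_cap _ _ _ _ hcap, pvBackfill_of_cap _ _ _ _ hcap,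
        pvBackfill_of_cap _ _ _ _ hcap]
    · simp only [List.cons_append, pvLoopBackfill, if_neg hcap]
      split_ifs with h
      · exact ih sel ids
      · exact ih (sel ++ [c]) _

theorem pvBackfill_fst (mc : Int) (l sel : List (List (String × String))) (ids : List String) :
    (pvLoopBackfill mc l sel ids).1 = sel ++ (pvDedup ids l).take (mc.toNat - sel.length) := by
  induction l generalizing sel ids with
  | nil => simp [pvLoopBackfill, pvDedup]
  | cons c rest ih =>
    by_cases hcap : mc ≤ (sel.length : Int)
    · have h0 : mc.toNat - sel.length = 0 := by omega
      rw [pvBackfill_of_cap _ _ _ _ hcap, h0]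
      simp
    · by_cases hmem : pvCaseId c ∈ ids
      · have hc : PySem.Set.contains ids (pvCaseId c) = true := by
          simpa using hmem
        simp only [pvLoopBackfill, if_neg hcap, hc, if_true, pvDedup, if_pos hmem]
        exact ih sel ids
      · have hc : PySem.Set.contains ids (pvCaseId c) = false := by
          simpa using hmem
        simp only [pvLoopBackfill, if_neg hcap, hc, Bool.false_eq_true, if_false,
          PySem.Set.add_of_not_mem hmem, pvDedup, if_neg hmem]
        rw [ih (sel ++ [c]) _]
        have hlen : (sel ++ [c]).length = sel.length + 1 := by simp
        rw [hlen]
        have hstep : mc.toNat - sel.length = (mc.toNat - (sel.length + 1)) + 1 := by omega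
        rw [hstep, List.take_succ_cons]
        simp

theorem pvDedup_append (ids : List String) (l1 l2 : List (List (String × String))) :
    pvDedup ids (l1 ++ l2) =
      pvDedup ids l1 ++ pvDedup (ids ++ (pvDedup ids l1).map pvCaseId) l2 := by
  induction l1 generalizing ids with
  | nil => simp [pvDedup]
  | cons c rest ih =>
    by_cases h : pvCaseId c ∈ ids
    · simp only [List.cons_append, pvDedup, if_pos h]
      exact ih ids
    · simp only [List.cons_append, pvDedup, if_neg h, List.map_cons, List.cons_append]
      rw [ih (ids ++ [pvCaseId c]), List.append_assoc]
      simp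

-- Source B's scan computes the first component of A's backfill loop
theorem pvScan_eq_backfill (mc : Int) (l sel : List (List (String × String)))
    (seen : PySem.Set String) : pvScan mc l sel seen = (pvLoopBackfill mc l sel seen).1 := by
  induction l generalizing sel seen with
  | nil => rfl
  | cons c rest ih =>
    simp only [pvScan, pvLoopBackfill]
    split_ifs <;> first | rfl | exact ih _ _

-- insertBy passes a block of elements it is not 'before'
theorem pvInsertBy_append {α : Type} (before : α → α → Bool) (x : α) (l1 l2 : List α)
    (h : ∀ y ∈ l1, before x y = false) :
    PySem.List.insertBy before x (l1 ++ l2) = l1 ++ PySem.List.insertBy before x l2 := by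
  induction l1 with
  | nil => rfl
  | cons a t ih =>
    have ha : before x a = false := h a (List.mem_cons_self)
    simp only [List.cons_append, PySem.List.insertBy, ha, Bool.false_eq_true, if_false]
    rw [ih (fun y hy => h y (List.mem_cons_of_mem _ hy))]

-- the stable sort by the binary flag is exactly "matched cases first, then the rest", both in order
theorem pvSorted_flag (fps : List String) (l : List (List (String × String))) :
    PySem.List.sorted l (pvFlag fps) =
      l.filter (pvMatches fps) ++ l.filter (fun c => !pvMatches fps c) := by
  rw [PySem.List.sorted_eq_foldl_insertBy]
  induction l using List.reverseRecOn with
  | nil => rfl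
  | append_singleton t x ih =>
    rw [List.foldl_append, List.foldl_cons, List.foldl_nil, ih, List.filter_append,
      List.filter_append, List.filter_singleton, List.filter_singleton]
    by_cases hx : pvMatches fps x = true
    · have hflag : pvFlag fps x = 0 := by simp [pvFlag, hx]
      rw [pvInsertBy_append _ _ _ _ (fun y hy => by
        have : pvMatches fps y = true := (List.mem_filter.mp hy).2
        simp [pvFlag, this, hx])]
      simp only [hx, Bool.not_true]
      cases hU : t.filter (fun c => !pvMatches fps c) with
      | nil => simp [PySem.List.insertBy]
      | cons u r =>
        have hu : pvMatches fps u = false := by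
          have := (List.mem_filter.mp (hU ▸ List.mem_cons_self)).2
          simpa using this
        simp [PySem.List.insertBy, pvFlag, hu, hx]
    · have hflag : pvFlag fps x = 1 := by simp [pvFlag, hx]
      rw [PySem.List.insertBy_of_forall_not_before _ _ _ (fun y hy => by
        rcases List.mem_append.mp hy with hy | hy
        · have : pvMatches fps y = true := (List.mem_filter.mp hy).2
          simp [pvFlag, this, hx]
        · have : pvMatches fps y = false := by
            simpa using (List.mem_filter.mp hy).2
          simp [pvFlag, this, hx])]
      simp [hx, List.append_assoc]

-- every element's id is recorded: either already among ids, or among the dedup output's ids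
theorem pvDedup_mem_ids (l : List (List (String × String))) (ids : List String)
    (c : List (String × String)) (hc : c ∈ l) :
    pvCaseId c ∈ ids ++ (pvDedup ids l).map pvCaseId := by
  induction l generalizing ids with
  | nil => cases hc
  | cons a rest ih =>
    rcases List.mem_cons.mp hc with rfl | hc'
    · by_cases ha : pvCaseId c ∈ ids
      · simp only [pvDedup, if_pos ha]
        exact List.mem_append_left _ ha
      · simp only [pvDedup, if_neg ha, List.map_cons]
        simp
    · by_cases ha : pvCaseId a ∈ ids
      · simp only [pvDedup, if_pos ha]
        exact ih ids hc'
      · simp only [pvDedup, if_neg ha, List.map_cons]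
        have h2 := ih (ids ++ [pvCaseId a]) hc'
        rcases List.mem_append.mp h2 with h | h
        · rcases List.mem_append.mp h with h | h
          · exact List.mem_append_left _ h
          · refine List.mem_append_right _ ?_
            simp only [List.mem_cons]
            exact Or.inl (by simpa using h)
        · refine List.mem_append_right _ ?_
          simp only [List.mem_cons]
          exact Or.inr h

-- elements failing q whose id is already recorded can be filtered out before dedup
theorem pvDedup_filter_skip (q : List (String × String) → Bool)
    (l : List (List (String × String))) (ids : List String)
    (h : ∀ c ∈ l, q c = false → pvCaseId c ∈ ids) :
    pvDedup ids l = pvDedup ids (l.filter q) := by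
  induction l generalizing ids with
  | nil => rfl
  | cons c rest ih =>
    by_cases hq : q c = true
    · rw [List.filter_cons_of_pos hq]
      by_cases hm : pvCaseId c ∈ ids
      · simp only [pvDedup, if_pos hm]
        exact ih ids (fun d hd => h d (List.mem_cons_of_mem _ hd))
      · simp only [pvDedup, if_neg hm]
        rw [ih (ids ++ [pvCaseId c]) (fun d hd hdq =>
          List.mem_append_left _ (h d (List.mem_cons_of_mem _ hd) hdq))]
    · have hq' : q c = false := by simpa using hq
      have hm : pvCaseId c ∈ ids := h c List.mem_cons_self hq'
      rw [List.filter_cons_of_neg (by simp [hq'])]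
      simp only [pvDedup, if_pos hm]
      exact ih ids (fun d hd => h d (List.mem_cons_of_mem _ hd))

-- ===== VERDICT (by name: the statement is the Claim_ definition above) =====
theorem select_cases_for_candidate_py_spec : Claim_equal_select_cases_for_candidate_py := by
  intro fps cs mc _ _
  show select_cases_for_candidate_py fps cs mc = select_cases_for_candidate_py_alt fps cs mc
  have hA : select_cases_for_candidate_py fps cs mc
      = (pvDedup [] ((cs.filter (pvMatches fps)) ++ cs)).take mc.toNat := by
    show (pvLoopBackfill mc cs (pvLoopFocus fps mc cs [] PySem.Set.empty).1
        (pvLoopFocus fps mc cs [] PySem.Set.empty).2).1 = _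
    rw [pvFocus_eq_backfill_filter, ← pvBackfill_append, pvBackfill_fst]
    simp [PySem.Set.empty]
  have hB : select_cases_for_candidate_py_alt fps cs mc
      = (pvDedup [] ((cs.filter (pvMatches fps)) ++ cs.filter (fun c => !pvMatches fps c))).take mc.toNat := by
    show pvScan mc (PySem.List.sorted cs (pvFlag fps)) [] PySem.Set.empty = _
    rw [pvScan_eq_backfill, pvSorted_flag, pvBackfill_fst]
    simp [PySem.Set.empty]
  rw [hA, hB, pvDedup_append, pvDedup_append]
  have hskip : pvDedup ([] ++ (pvDedup [] (cs.filter (pvMatches fps))).map pvCaseId) cs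
      = pvDedup ([] ++ (pvDedup [] (cs.filter (pvMatches fps))).map pvCaseId)
          (cs.filter (fun c => !pvMatches fps c)) := by
    apply pvDedup_filter_skip
    intro c hc hq
    have hmc : pvMatches fps c = true := by simpa using hq
    have : c ∈ cs.filter (pvMatches fps) := List.mem_filter.mpr ⟨hc, hmc⟩
    simpa using pvDedup_mem_ids _ [] c this
  rw [hskip]
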